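-- pv_equiv track=rewrite | github.com/AlgoRogue/task-tracer | agents/takvim.py | _catismalari_bul
-- ===== SOURCE A (Python) =====
-- from collections import defaultdict
--
-- _CATISMA_ESIGI = 2
--
-- def _catismalari_bul(gorevler):
--     tarih_sayac = defaultdict(list)
--     for g in gorevler:
--         if g["son_tarih"]:
--             tarih_sayac[g["son_tarih"]].append(g["baslik"])
--     return {
--         t: basliklar
--         for t, basliklar in tarih_sayac.items()
--         if len(basliklar) >= _CATISMA_ESIGI
--     }
-- ===== SOURCE B (Python) =====
-- _CATISMA_ESIGI = 2
--
-- def _catismalari_bul(gorevler):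
--     kalan = [(g["son_tarih"], g["baslik"]) for g in gorevler if g["son_tarih"]]
--     sonuc = {}
--     while kalan:
--         t = kalan[0][0]
--         grup = [b for d, b in kalan if d == t]
--         if len(grup) >= _CATISMA_ESIGI:
--             sonuc[t] = grup
--         kalan = [(d, b) for d, b in kalan if d != t]
--     return sonuc
-- ===== Notes on version B (the rewrite author's own statement) =====
-- stated objective: alternative
-- what changed: B replaces A's defaultdict accumulation plus length-filtering dict comprehension with a dict-free repeated-partition loop: it extracts the first remaining deadline, gathers its whole group by scanning, emits it if it has >= 2 titles, and recurses on the tasks with a different deadline.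
import Mathlib
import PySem

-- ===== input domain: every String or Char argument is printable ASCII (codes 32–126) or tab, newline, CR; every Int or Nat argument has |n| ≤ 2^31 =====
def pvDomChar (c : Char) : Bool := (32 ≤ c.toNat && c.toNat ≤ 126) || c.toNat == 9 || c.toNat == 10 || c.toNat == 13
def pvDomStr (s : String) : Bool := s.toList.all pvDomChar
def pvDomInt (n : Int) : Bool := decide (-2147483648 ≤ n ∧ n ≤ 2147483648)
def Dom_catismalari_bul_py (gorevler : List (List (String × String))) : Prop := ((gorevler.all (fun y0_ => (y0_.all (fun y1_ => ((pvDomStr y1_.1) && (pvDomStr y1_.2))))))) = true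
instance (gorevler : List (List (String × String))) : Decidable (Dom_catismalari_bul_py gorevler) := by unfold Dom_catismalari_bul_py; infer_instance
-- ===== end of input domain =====

-- B replaces A's defaultdict-accumulate-then-filter with a dict-free repeated-partition loop
-- (take the first remaining deadline, scan out its whole group, keep it if >= 2, drop that
-- deadline and repeat); same return value, different algorithm (objective: alternative).

-- shared helper: g[k] as Python dict lookup on an association list (first match; none = KeyError)
def pvGet? (g : List (String × String)) (k : String) : Option String :=
  (g.find? (fun p => p.1 == k)).map (·.2)

-- ===== PORT A =====
-- loop body of A: if g["son_tarih"]: tarih_sayac[g["son_tarih"]].append(g["baslik"])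
def pvAdimA (d : PySem.Dict String (List String)) (g : List (String × String)) :
    PySem.Dict String (List String) :=
  match pvGet? g "son_tarih" with
  | some t => if t ≠ "" then d.modify t [] (fun bs => bs ++ [(pvGet? g "baslik").getD ""]) else d
  | none => d

def catismalari_bul_py (gorevler : List (List (String × String))) : List (String × List String) :=
  ((gorevler.foldl pvAdimA PySem.Dict.empty).items).filter (fun p => decide (2 ≤ p.2.length))

-- ===== PORT B =====
-- kalan = [(g["son_tarih"], g["baslik"]) for g in gorevler if g["son_tarih"]]
def pvCiftler (gorevler : List (List (String × String))) : List (String × String) :=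
  gorevler.filterMap (fun g =>
    match pvGet? g "son_tarih" with
    | some t => if t ≠ "" then some (t, (pvGet? g "baslik").getD "") else none
    | none => none)

-- the while-loop of B: t = kalan[0][0]; grup = titles with deadline t; emit if >= 2; drop deadline t
def pvDonguB : List (String × String) → PySem.Dict String (List String) →
    PySem.Dict String (List String)
  | [], sonuc => sonuc
  | (t, b) :: rest, sonuc =>
      let grup := (((t, b) :: rest).filter (fun p => p.1 == t)).map (·.2)
      pvDonguB (((t, b) :: rest).filter (fun p => !(p.1 == t)))
        (if 2 ≤ grup.length then sonuc.insert t grup else sonuc)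
  termination_by ps _ => ps.length
  decreasing_by
    rw [List.filter_cons_of_neg (by simp)]
    exact Nat.lt_succ_of_le (List.length_filter_le _ _)

def catismalari_bul_py_alt (gorevler : List (List (String × String))) : List (String × List String) :=
  (pvDonguB (pvCiftler gorevler) PySem.Dict.empty).items

-- ===== PRECONDITION & SPEC =====
-- Pre_ excludes only inputs on which the Python A raises KeyError: every task must carry the
-- "son_tarih" key, and the "baslik" key whenever its son_tarih is truthy.
def Pre_catismalari_bul_py (gorevler : List (List (String × String))) : Prop :=
  (gorevler.all (fun g =>
    match pvGet? g "son_tarih" with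
    | some t => (t == "") || (pvGet? g "baslik").isSome
    | none => false)) = true
instance (gorevler : List (List (String × String))) : Decidable (Pre_catismalari_bul_py gorevler) := by
  unfold Pre_catismalari_bul_py; infer_instance

def pvWitness_catismalari_bul_py : (List (List (String × String))) :=
  [[("son_tarih", "d1"), ("baslik", "a")], [("son_tarih", "d1"), ("baslik", "b")]]

def Spec_catismalari_bul_py (gorevler : List (List (String × String))) (out : List (String × List String)) : Prop := out = catismalari_bul_py_alt gorevler
instance (gorevler : List (List (String × String))) (out : List (String × List String)) : Decidable (Spec_catismalari_bul_py gorevler out) := by unfold Spec_catismalari_bul_py; infer_instance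

-- ===== CLAIM (what is proved, stated in full; the proofs are below) =====
def Claim_equal_catismalari_bul_py : Prop := ∀ (gorevler : List (List (String × String))), Dom_catismalari_bul_py gorevler → Pre_catismalari_bul_py gorevler → Spec_catismalari_bul_py gorevler (catismalari_bul_py gorevler)

-- ===== LEMMAS AND PROOFS =====

-- A's group-accumulation step on the (deadline, title) pairs
def pvStep (d : PySem.Dict String (List String)) (p : String × String) :
    PySem.Dict String (List String) :=
  d.modify p.1 [] (fun bs => bs ++ [p.2])

-- A's whole computation, expressed on the pair list
def pvA (P : List (String × String)) : List (String × List String) :=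
  ((P.foldl pvStep PySem.Dict.empty).items).filter (fun p => decide (2 ≤ p.2.length))

theorem pvFoldA (gs : List (List (String × String))) :
    ∀ d, gs.foldl pvAdimA d = (pvCiftler gs).foldl pvStep d := by
  induction gs with
  | nil => intro d; rfl
  | cons g gs ih =>
    intro d
    rw [List.foldl_cons]
    cases h : pvGet? g "son_tarih" with
    | none =>
      simp only [pvCiftler, List.filterMap_cons, h]
      simp only [pvAdimA, h]
      exact ih d
    | some t =>
      by_cases ht : t = ""
      · subst ht
        simp only [pvCiftler, List.filterMap_cons, h, ne_eq, not_true_eq_false, if_false]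
        simp only [pvAdimA, h, ne_eq, not_true_eq_false, if_false]
        exact ih d
      · simp only [pvCiftler, List.filterMap_cons, h, ne_eq, ht, not_false_eq_true, if_true]
        rw [List.foldl_cons]
        simp only [pvAdimA, h, ne_eq, ht, not_false_eq_true, if_true]
        exact ih _

theorem pvDiscardFilter {α : Type} [BEq α] [LawfulBEq α] (p : α → Bool) (s : List α) (x : α) :
    PySem.Set.discard (s.filter p) x = (PySem.Set.discard s x).filter p := by
  simp only [PySem.Set.discard, List.filter_filter]
  apply List.filter_congr
  intro y _
  rw [Bool.and_comm]

theorem pvOfListFilter {α : Type} [BEq α] [LawfulBEq α] (p : α → Bool) (l : List α) :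
    PySem.Set.ofList (l.filter p) = (PySem.Set.ofList l).filter p := by
  induction l with
  | nil => rfl
  | cons x xs ih =>
    rw [PySem.Set.ofList_cons, List.filter_cons]
    cases hx : p x with
    | true =>
      rw [if_pos rfl]
      rw [PySem.Set.ofList_cons, ih, pvDiscardFilter, List.filter_cons, hx]
      simp
    | false =>
      rw [if_neg (by simp)]
      rw [ih, PySem.Set.discard, List.filter_cons_of_neg (by simp [hx]), List.filter_filter]
      symm
      apply List.filter_congr
      intro y _
      cases hpy : p y with
      | false => simp
      | true =>
        have hyx : (y == x) = false := by
          cases hyx : y == x with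
          | false => rfl
          | true => rw [eq_of_beq hyx, hx] at hpy; exact absurd hpy (by simp)
        simp [hyx]

theorem pvKeys (P : List (String × String)) :
    (P.foldl pvStep PySem.Dict.empty).keys = PySem.Set.ofList (P.map Prod.fst) := by
  have h := PySem.Dict.keys_foldl_modify_key P Prod.fst ([] : List String)
      (fun _ p bs => bs ++ [p.2]) PySem.Dict.empty
  rw [PySem.Dict.keys_empty, PySem.Set.update_nil_left] at h
  exact h

theorem pvNodup (P : List (String × String)) :
    (P.foldl pvStep PySem.Dict.empty).keys.Nodup := by
  exact PySem.Dict.nodup_keys_foldl_modify_key P Prod.fst ([] : List String)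
      (fun _ p bs => bs ++ [p.2]) PySem.Dict.empty (by simp [PySem.Dict.keys_empty])

theorem pvGetDFold (P : List (String × String)) (k : String) :
    (P.foldl pvStep PySem.Dict.empty).getD k []
      = (P.filter (fun p => p.1 == k)).map (fun x => x.2) := by
  have h := PySem.Dict.getD_foldl_modify_append P PySem.Dict.empty k
  rw [PySem.Dict.getD_empty] at h
  exact h

theorem pvItems (P : List (String × String)) :
    (P.foldl pvStep PySem.Dict.empty).items
      = (PySem.Set.ofList (P.map Prod.fst)).map
          (fun k => (k, (P.filter (fun p => p.1 == k)).map (fun x => x.2))) := by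
  rw [PySem.Dict.items_eq_map_keys _ (pvNodup P) [], pvKeys P]
  apply List.map_congr_left
  intro k _
  rw [pvGetDFold]

-- pvA satisfies B's partition recursion
theorem pvA_nil : pvA [] = [] := rfl

theorem pvA_cons (t b : String) (rest : List (String × String)) :
    pvA ((t, b) :: rest)
      = (if 2 ≤ ((((t, b) :: rest).filter (fun p => p.1 == t)).map (fun x => x.2)).length
         then [(t, (((t, b) :: rest).filter (fun p => p.1 == t)).map (fun x => x.2))] else [])
        ++ pvA (((t, b) :: rest).filter (fun p => !(p.1 == t))) := by
  have hmapfilter : ((((t, b) :: rest).filter (fun p => !(p.1 == t))).map Prod.fst)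
      = (((t, b) :: rest).map Prod.fst).filter (fun y => !(y == t)) := by
    rw [List.filter_map]; rfl
  unfold pvA
  rw [pvItems, pvItems, hmapfilter, pvOfListFilter,
    show ((t, b) :: rest).map Prod.fst = t :: rest.map Prod.fst from rfl,
    PySem.Set.ofList_cons]
  set D := PySem.Set.discard (PySem.Set.ofList (rest.map Prod.fst)) t with hDdef
  have hDt : ∀ y ∈ D, (y == t) = false := by
    intro y hy
    have hne : y ≠ t := ((PySem.Set.mem_discard _ _ _).mp hy).2
    simp [hne]
  have hcons : List.filter (fun y => !(y == t)) (t :: D) = List.filter (fun y => !(y == t)) D := by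
    rw [List.filter_cons_of_neg]; simp
  have hDfix : List.filter (fun y => !(y == t)) D = D :=
    List.filter_eq_self.mpr (fun y hy => by rw [hDt y hy]; rfl)
  rw [List.map_cons, List.filter_cons, hcons, hDfix]
  have htail : D.map (fun k => (k, ((((t, b) :: rest)).filter (fun p => p.1 == k)).map (fun x => x.2)))
      = D.map (fun k => (k, ((((t, b) :: rest).filter (fun p => !(p.1 == t))).filter
          (fun p => p.1 == k)).map (fun x => x.2))) := by
    apply List.map_congr_left
    intro k hk
    congr 2
    rw [List.filter_filter]
    apply List.filter_congr
    intro p _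
    cases hpk : p.1 == k with
    | false => simp
    | true =>
      have hp1 : p.1 = k := eq_of_beq hpk
      have hkt : (k == t) = false := hDt k hk
      simp [hp1, hkt]
  rw [htail]
  simp only [decide_eq_true_eq]
  by_cases hlen : 2 ≤ ((((t, b) :: rest).filter (fun p => p.1 == t)).map (fun x => x.2)).length
  · rw [if_pos (by simpa using hlen), if_pos hlen]
    rfl
  · rw [if_neg (by simpa using hlen), if_neg hlen]
    rfl

-- the loop of B appends pvA of its remaining pairs, provided no remaining key is already in sonuc
theorem pvDonguB_items (n : Nat) : ∀ (ps : List (String × String)), ps.length ≤ n →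
    ∀ (d : PySem.Dict String (List String)),
      (∀ p ∈ ps, d.contains p.1 = false) →
      (pvDonguB ps d).items = d.items ++ pvA ps := by
  induction n with
  | zero =>
    intro ps hps d _
    have : ps = [] := List.eq_nil_of_length_eq_zero (Nat.le_zero.mp hps)
    subst this
    simp [pvDonguB, pvA_nil]
  | succ n ih =>
    intro ps hps d hd
    match ps with
    | [] => simp [pvDonguB, pvA_nil]
    | (t, b) :: rest =>
      rw [pvA_cons]
      simp only [pvDonguB]
      have hrestlen : (((t, b) :: rest).filter (fun p => !(p.1 == t))).length ≤ n := by
        rw [List.filter_cons_of_neg (by simp)]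
        exact Nat.le_trans (List.length_filter_le _ _) (Nat.le_of_succ_le_succ hps)
      have htmem : d.contains t = false := hd (t, b) (List.mem_cons_self ..)
      by_cases hlen : 2 ≤ ((((t, b) :: rest).filter (fun p => p.1 == t)).map (fun x => x.2)).length
      · rw [if_pos hlen, if_pos hlen]
        rw [ih _ hrestlen _ ?_]
        · rw [PySem.Dict.items_insert_of_not_contains d _ htmem, List.append_assoc,
            List.cons_append, List.nil_append]
        · intro p hp
          have hpt : (p.1 == t) = false := by
            have := (List.mem_filter.mp hp).2
            cases h : p.1 == t with
            | false => rfl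
            | true => rw [h] at this; simp at this
          rw [PySem.Dict.contains_insert, hpt, Bool.false_or]
          exact hd p (List.mem_of_mem_filter hp)
      · rw [if_neg hlen, if_neg hlen, List.nil_append]
        exact ih _ hrestlen _ (fun p hp => hd p (List.mem_of_mem_filter hp))

-- ===== VERDICT (by name: the statement is the Claim_ definition above) =====
theorem catismalari_bul_py_spec : Claim_equal_catismalari_bul_py := by
  intro gs _ _
  unfold Spec_catismalari_bul_py catismalari_bul_py catismalari_bul_py_alt
  rw [pvFoldA, pvDonguB_items (pvCiftler gs).length _ (Nat.le_refl _) _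
    (fun p _ => PySem.Dict.contains_empty p.1)]
  rfl
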